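-- pv_equiv track=rewrite | github.com/johanvdw/istsos-debian | walib/utils.py | valid_NCName
-- ===== SOURCE A (Python) =====
-- def valid_NCName(name):
--     not_allowed_NCName = [' ', '!','"', '#', '$', '%', '&', '\'',
--                           '(', ')', '*', '+', ',', '/', ':', ';',
--                           '<', '=', '>', '?', '@', '[', '\\', ']',
--                           '^', '`', '{', '|', '}', '~']
--     for c in not_allowed_NCName:
--         if name.find(c)>0:
--             return False
--     return True
-- ===== SOURCE B (Python) =====
-- def valid_NCName(name):
--     disallowed = frozenset(' !"#$%&\'()*+,/:;<=>?@[\\]^`{|}~')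
--     for c in name:
--         if c in disallowed:
--             return False
--     return True
-- ===== Notes on version B (the rewrite author's own statement) =====
-- stated objective: simpler
-- what changed: Replaces 30 repeated full-string scans (one name.find per disallowed character) with a single left-to-right pass over name testing frozenset membership, rejecting a disallowed character wherever it occurs.
-- intended difference: On names whose first character is disallowed while every disallowed character occurring in the name equals that first character (e.g. '!a'), A returns True because find(c)>0 ignores a match at position 0, while B returns False, which is intended since an NCName may not contain (let alone start with) such a character. — e.g. on valid_NCName("!a"): A returns true, B returns false
import Mathlib
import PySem

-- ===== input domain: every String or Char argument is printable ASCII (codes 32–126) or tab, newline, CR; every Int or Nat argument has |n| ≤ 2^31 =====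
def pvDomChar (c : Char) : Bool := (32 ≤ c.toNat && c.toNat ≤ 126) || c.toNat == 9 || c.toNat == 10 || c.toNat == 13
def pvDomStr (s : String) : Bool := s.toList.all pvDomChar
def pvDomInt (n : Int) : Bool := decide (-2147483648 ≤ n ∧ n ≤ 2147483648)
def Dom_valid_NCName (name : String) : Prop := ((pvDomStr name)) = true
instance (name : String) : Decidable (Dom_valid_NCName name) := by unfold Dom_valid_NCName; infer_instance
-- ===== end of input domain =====

-- B replaces A's 30 repeated name.find scans with a single pass over name testing set
-- membership (objective: simpler); on names whose only disallowed characters are copies of a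
-- disallowed first character, A returns True (find(c)>0 ignores position 0) and B returns False.


-- the 30 characters both programs treat as disallowed (shared constant)
def pvDisallowed : List Char := [' ', '!', '"', '#', '$', '%', '&', '\'',
                                 '(', ')', '*', '+', ',', '/', ':', ';',
                                 '<', '=', '>', '?', '@', '[', '\\', ']',
                                 '^', '`', '{', '|', '}', '~']

-- ===== PORT A =====
-- 'for c in not_allowed_NCName: if name.find(c) > 0: return False' / 'return True'
def pvLoopA (name : String) : List Char → Bool
  | [] => true
  | c :: cs => if PySem.Str.find name (String.singleton c) > 0 then false else pvLoopA name cs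

def valid_NCName (name : String) : Bool := pvLoopA name pvDisallowed

-- ===== PORT B =====
-- disallowed = frozenset(' !"#$%&\'()*+,/:;<=>?@[\\]^`{|}~')
def pvDisSet : PySem.Set Char := PySem.Set.ofList " !\"#$%&'()*+,/:;<=>?@[\\]^`{|}~".toList

-- 'for c in name: if c in disallowed: return False' / 'return True'
def pvLoopB : List Char → Bool
  | [] => true
  | c :: cs => if PySem.Set.contains pvDisSet c then false else pvLoopB cs

def valid_NCName_alt (name : String) : Bool := pvLoopB name.toList

-- ===== PRECONDITION & SPEC =====
-- On names whose first character is disallowed and in which every disallowed character equals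
-- that first character, A returns True (find(c)>0 ignores the match at position 0) while B
-- returns False, which is intended: an NCName may not contain (let alone start with) such a character.
def D_valid_NCName (name : String) : Prop :=
  name.toList ≠ [] ∧ name.toList.headI ∈ pvDisallowed ∧
    ∀ c ∈ name.toList, c ∈ pvDisallowed → c = name.toList.headI
instance (name : String) : Decidable (D_valid_NCName name) := by unfold D_valid_NCName; infer_instance

def Spec_valid_NCName (name : String) (out : Bool) : Prop := ¬ D_valid_NCName name → out = valid_NCName_alt name
instance (name : String) (out : Bool) : Decidable (Spec_valid_NCName name out) := by unfold Spec_valid_NCName; infer_instance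

def pvDiffWitness_valid_NCName : String := "!a"
def pvDiffWitnessOut_valid_NCName : Bool × Bool := (true, false)

-- ===== CLAIM (what is proved, stated in full; the proofs are below) =====
def Claim_unchanged_valid_NCName : Prop := ∀ (name : String), Dom_valid_NCName name → Spec_valid_NCName name (valid_NCName name)
def Claim_changed_valid_NCName : Prop := Dom_valid_NCName (pvDiffWitness_valid_NCName) ∧ D_valid_NCName (pvDiffWitness_valid_NCName) ∧ valid_NCName (pvDiffWitness_valid_NCName) = pvDiffWitnessOut_valid_NCName.1 ∧ valid_NCName_alt (pvDiffWitness_valid_NCName) = pvDiffWitnessOut_valid_NCName.2 ∧ pvDiffWitnessOut_valid_NCName.1 ≠ pvDiffWitnessOut_valid_NCName.2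
def Claim_exact_valid_NCName : Prop := ∀ (name : String), Dom_valid_NCName name → D_valid_NCName name → valid_NCName name ≠ valid_NCName_alt name

-- ===== LEMMAS AND PROOFS =====

-- name.find(c) > 0 for a single character c: c occurs in name, but not first.
theorem pvFind_singleton_pos (c : Char) (l : List Char) :
    (PySem.Chars.find l [c] > 0) ↔ (c ∈ l ∧ l.head? ≠ some c) := by
  constructor
  · intro h
    have hnn : (0:Int) ≤ PySem.Chars.find l [c] := le_of_lt h
    have hin : [c] <:+: l := (PySem.Chars.find_nonneg_iff l [c]).mp hnn
    refine ⟨(List.singleton_infix_iff c l).mp hin, ?_⟩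
    have hs := PySem.Chars.find_spec hnn
    have h0 := hs.2 0 (by omega)
    simp at h0
    intro hh
    cases l with
    | nil => simp at hh
    | cons a t => simp at hh; exact h0 ⟨t, by simp [hh]⟩
  · rintro ⟨hmem, hhd⟩
    have hin : [c] <:+: l := (List.singleton_infix_iff c l).mpr hmem
    have hnn : (0:Int) ≤ PySem.Chars.find l [c] := (PySem.Chars.find_nonneg_iff l [c]).mpr hin
    rcases lt_or_eq_of_le hnn with h | h
    · exact h
    · exfalso
      have hs := PySem.Chars.find_spec hnn
      have hp := hs.1
      rw [← h] at hp
      simp at hp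
      rcases hp with ⟨t, ht⟩
      rw [← ht] at hhd; simp at hhd

theorem pvLoopA_eq_true_iff (name : String) (l : List Char) :
    pvLoopA name l = true ↔ ∀ c ∈ l, ¬ (c ∈ name.toList ∧ name.toList.head? ≠ some c) := by
  induction l with
  | nil => simp [pvLoopA]
  | cons c cs ih =>
    simp only [pvLoopA]
    by_cases h : PySem.Str.find name (String.singleton c) > 0
    · rw [if_pos h]
      have hcc : c ∈ name.toList ∧ name.toList.head? ≠ some c := by
        have := (pvFind_singleton_pos c name.toList).mp (by simpa using h)
        exact this
      constructor
      · intro hfalse; exact absurd hfalse (by simp)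
      · intro hall
        exact absurd hcc (hall c (List.mem_cons_self ..))
    · simp only [if_neg h, ih]
      constructor
      · intro hall c' hc'
        rcases List.mem_cons.mp hc' with rfl | hmem
        · intro hcontra
          exact h (by simpa using (pvFind_singleton_pos c' name.toList).mpr hcontra)
        · exact hall c' hmem
      · intro hall c' hc'
        exact hall c' (List.mem_cons_of_mem _ hc')

theorem pvHeadI_of_head? {l : List Char} {c : Char} (h : l.head? = some c) : l.headI = c := by
  cases l <;> simp_all

theorem pvHeadI_mem {l : List Char} (h : l ≠ []) : l.headI ∈ l := by
  cases l <;> simp_all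

theorem pvDisSet_eq : pvDisSet = pvDisallowed := by decide

theorem pvLoopB_eq_true_iff (l : List Char) :
    pvLoopB l = true ↔ ∀ c ∈ l, c ∉ pvDisallowed := by
  induction l with
  | nil => simp [pvLoopB]
  | cons c cs ih =>
    simp only [pvLoopB]
    by_cases h : PySem.Set.contains pvDisSet c = true
    · rw [if_pos h]
      have hc : c ∈ pvDisallowed := by
        rw [pvDisSet_eq] at h
        simpa [PySem.Set.contains] using h
      constructor
      · intro hfalse; exact absurd hfalse (by simp)
      · intro hall
        exact absurd hc (hall c (List.mem_cons_self ..))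
    · simp only [if_neg h, ih]
      have hc : c ∉ pvDisallowed := by
        rw [pvDisSet_eq] at h
        simpa [PySem.Set.contains] using h
      constructor
      · intro hall c' hc'
        rcases List.mem_cons.mp hc' with rfl | hmem
        · exact hc
        · exact hall c' hmem
      · intro hall c' hc'
        exact hall c' (List.mem_cons_of_mem _ hc')

-- ===== VERDICT (by name: the statement is the Claim_ definition above) =====
theorem valid_NCName_spec : Claim_unchanged_valid_NCName := by
  unfold Claim_unchanged_valid_NCName
  intro name _ hnd
  show valid_NCName name = valid_NCName_alt name
  unfold valid_NCName valid_NCName_alt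
  by_cases hB : pvLoopB name.toList = true
  · -- no disallowed char anywhere ⇒ A is also true
    have hBall := (pvLoopB_eq_true_iff name.toList).mp hB
    have hA : pvLoopA name pvDisallowed = true := by
      rw [pvLoopA_eq_true_iff]
      intro c hcd hpair
      exact (hBall c hpair.1) hcd
    rw [hA, hB]
  · have hBfalse : pvLoopB name.toList = false := by
      cases hb : pvLoopB name.toList
      · rfl
      · exact absurd hb hB
    -- some c ∈ l is disallowed
    have : ∃ c ∈ name.toList, c ∈ pvDisallowed := by
      by_contra hno
      push Not at hno
      exact hB ((pvLoopB_eq_true_iff name.toList).mpr hno)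
    rcases this with ⟨c, hcl, hcd⟩
    have hAfalse : pvLoopA name pvDisallowed = false := by
      cases ha : pvLoopA name pvDisallowed
      · rfl
      · exfalso
        have hAall := (pvLoopA_eq_true_iff name pvDisallowed).mp ha
        -- every disallowed char occurring in l is first; derive D_
        apply hnd
        have hhead : name.toList.head? = some c := by
          by_contra hne
          exact hAall c hcd ⟨hcl, hne⟩
        have hlne : name.toList ≠ [] := by intro h; rw [h] at hhead; simp at hhead
        have hheadI : name.toList.headI = c := pvHeadI_of_head? hhead
        refine ⟨hlne, by rw [hheadI]; exact hcd, ?_⟩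
        intro c' hc'l hc'd
        have hhead' : name.toList.head? = some c' := by
          by_contra hne
          exact hAall c' hc'd ⟨hc'l, hne⟩
        rw [hhead] at hhead'
        have : c = c' := by injection hhead'
        rw [← this, hheadI]
    rw [hAfalse, hBfalse]

set_option maxRecDepth 4000 in
theorem valid_NCName_changed : Claim_changed_valid_NCName := by
  unfold Claim_changed_valid_NCName
  refine ⟨by decide, ⟨by decide, by decide, ?_⟩, by decide, by decide, by decide⟩
  intro c hc
  fin_cases hc <;> decide

theorem valid_NCName_tight : Claim_exact_valid_NCName := by
  unfold Claim_exact_valid_NCName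
  intro name _ hd
  rcases hd with ⟨hne, hhd, hall⟩
  unfold valid_NCName valid_NCName_alt
  have hBfalse : pvLoopB name.toList ≠ true := fun h =>
    ((pvLoopB_eq_true_iff name.toList).mp h name.toList.headI (pvHeadI_mem hne)) hhd
  have hAtrue : pvLoopA name pvDisallowed = true := by
    rw [pvLoopA_eq_true_iff]
    intro c hcd hpair
    obtain ⟨hcl, hcne⟩ := hpair
    have : c = name.toList.headI := hall c hcl hcd
    apply hcne
    rw [this]
    cases hl : name.toList with
    | nil => exact absurd hl hne
    | cons a t => simp
  rw [hAtrue]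
  intro h
  exact hBfalse h.symm
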